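-- pv_equiv track=rewrite | github.com/s180820/02807_dkpol | utils/similarity.py | most_similar_persons
-- ===== SOURCE A (Python) =====
-- def most_similar_persons(similar_items, num_similar_persons=3):
--     """
--     Input:
--         - similar_items (dict of tuple:str): dictionary of similar items
--         - num_similar_persons (int): number of similar persons to return
--     Return: dictionary of most similar persons
--     """
--     most_similar_persons = {}
--     for key,value in similar_items.items():
--         if key[0] not in most_similar_persons:
--             most_similar_persons[key[0]] = [(key[1], value)]
--         else:
--             most_similar_persons[key[0]].append((key[1], value))
--         if key[1] not in most_similar_persons:
--             most_similar_persons[key[1]] = [(key[0], value)]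
--         else:
--             most_similar_persons[key[1]].append((key[0], value))
--     for key,value in most_similar_persons.items():
--         most_similar_persons[key] = sorted(value, key=lambda x: x[1], reverse=True)[:num_similar_persons]
--     return most_similar_persons
-- ===== SOURCE B (Python) =====
-- def most_similar_persons(similar_items, num_similar_persons=3):
--     """
--     Sort-first re-implementation: one global stable sort of the edges by value
--     descending, then a single grouping pass; each person's list emerges already
--     sorted (stability keeps tie order), so only a slice per person remains.
--     """
--     neighbors = {}
--     for key in similar_items:
--         neighbors.setdefault(key[0], [])
--         neighbors.setdefault(key[1], [])
--     for key, value in sorted(similar_items.items(), key=lambda kv: kv[1], reverse=True):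
--         neighbors[key[0]].append((key[1], value))
--         neighbors[key[1]].append((key[0], value))
--     return {p: lst[:num_similar_persons] for p, lst in neighbors.items()}
-- ===== Notes on version B (the rewrite author's own statement) =====
-- stated objective: alternative
-- what changed: Instead of grouping edges per person and then sorting each person's neighbor list, B does one global stable sort of all edges by value descending and a single grouping pass, so each person's list emerges already sorted (stability preserves A's tie order) and only a slice per person remains.
import Mathlib
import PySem

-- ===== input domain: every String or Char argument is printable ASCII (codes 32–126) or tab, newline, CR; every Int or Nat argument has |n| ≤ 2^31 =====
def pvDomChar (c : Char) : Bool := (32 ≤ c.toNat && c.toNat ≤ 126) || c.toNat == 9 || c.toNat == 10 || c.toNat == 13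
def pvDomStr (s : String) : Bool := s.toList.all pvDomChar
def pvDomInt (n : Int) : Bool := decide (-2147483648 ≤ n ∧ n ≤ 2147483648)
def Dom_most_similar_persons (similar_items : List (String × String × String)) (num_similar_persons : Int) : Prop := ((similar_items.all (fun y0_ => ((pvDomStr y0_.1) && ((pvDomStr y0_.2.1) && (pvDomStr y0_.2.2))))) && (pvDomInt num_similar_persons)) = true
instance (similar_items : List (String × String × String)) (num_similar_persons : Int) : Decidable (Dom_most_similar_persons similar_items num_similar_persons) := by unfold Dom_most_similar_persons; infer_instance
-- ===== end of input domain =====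

-- B replaces A's per-person sorting by ONE global stable sort of the edges followed by a single
-- grouping pass; same return value, proved below (objective: alternative decomposition).

-- ===== PORT A =====
-- one endpoint of A's first loop: 'if k not in d: d[k] = [e]  else: d[k].append(e)'
def pvStepA (d : PySem.Dict String (List (String × String))) (k : String) (e : String × String) :
    PySem.Dict String (List (String × String)) :=
  if d.contains k = false then d.insert k [e] else d.modify k [] (fun l => l ++ [e])

def most_similar_persons (similar_items : List (String × String × String)) (num_similar_persons : Int) : List (String × List (String × String)) :=
  let msp := similar_items.foldl
    (fun d t => pvStepA (pvStepA d t.1 (t.2.1, t.2.2)) t.2.1 (t.1, t.2.2)) PySem.Dict.empty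
  -- A's second loop reassigns every EXISTING key in place (insertion order kept), so it is a map over items
  msp.items.map (fun p =>
    (p.1, PySem.List.slice (PySem.List.sorted p.2 (fun x => x.2) true) none (some num_similar_persons)))

-- ===== PORT B =====
def most_similar_persons_alt (similar_items : List (String × String × String)) (num_similar_persons : Int) : List (String × List (String × String)) :=
  let base := similar_items.foldl
    (fun d t => (d.setdefault t.1 []).setdefault t.2.1 []) PySem.Dict.empty
  let srt := PySem.List.sorted similar_items (fun t => t.2.2) true
  -- 'neighbors[k].append(e)' on a key guaranteed present (base holds every person) is modify k [] (· ++ [e])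
  let filled := srt.foldl
    (fun d t => (d.modify t.1 [] (fun l => l ++ [(t.2.1, t.2.2)])).modify t.2.1 [] (fun l => l ++ [(t.1, t.2.2)])) base
  filled.items.map (fun p => (p.1, PySem.List.slice p.2 none (some num_similar_persons)))

-- ===== PRECONDITION & SPEC =====
def Spec_most_similar_persons (similar_items : List (String × String × String)) (num_similar_persons : Int) (out : List (String × List (String × String))) : Prop := out = most_similar_persons_alt similar_items num_similar_persons
instance (similar_items : List (String × String × String)) (num_similar_persons : Int) (out : List (String × List (String × String))) : Decidable (Spec_most_similar_persons similar_items num_similar_persons out) := by unfold Spec_most_similar_persons; infer_instance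

-- ===== CLAIM (what is proved, stated in full; the proofs are below) =====
def Claim_equal_most_similar_persons : Prop := ∀ (similar_items : List (String × String × String)) (num_similar_persons : Int), Dom_most_similar_persons similar_items num_similar_persons → Spec_most_similar_persons similar_items num_similar_persons (most_similar_persons similar_items num_similar_persons)

-- ===== LEMMAS AND PROOFS =====

-- the stream of (person, (neighbor, value)) contributions of an edge list
def pvPairs (L : List (String × String × String)) : List (String × (String × String)) :=
  L.flatMap (fun t => [(t.1, (t.2.1, t.2.2)), (t.2.1, (t.1, t.2.2))])

theorem pv_insertBy_prefix {β : Type} (before : β → β → Bool) (x : β) (w X : List β)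
    (hw : ∀ z ∈ w, before x z = false) :
    PySem.List.insertBy before x (w ++ X) = w ++ PySem.List.insertBy before x X := by
  induction w with
  | nil => rfl
  | cons z w ih =>
    simp only [List.cons_append, PySem.List.insertBy, hw z (by simp)]
    simp only [Bool.false_eq_true, if_false]
    rw [show PySem.List.insertBy before x (w ++ X) = w ++ PySem.List.insertBy before x X from
      ih (fun z hz => hw z (by simp [hz]))]

theorem pv_insertBy_all {β : Type} (before : β → β → Bool) (x : β) (v : List β)
    (hv : ∀ z ∈ v, before x z = true) :
    PySem.List.insertBy before x v = x :: v := by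
  cases v with
  | nil => rfl
  | cons z v => simp [PySem.List.insertBy, hv z (by simp)]

theorem pv_foldl_ins_equal {β : Type} (k' : β → String) (c : String) :
    ∀ (bs u v : List β), (∀ b ∈ bs, k' b = c) → (∀ z ∈ u, ¬ k' z < c) → (∀ z ∈ v, k' z < c) →
    bs.foldl (fun l b => PySem.List.insertBy (fun p q => decide (k' q < k' p)) b l) (u ++ v)
      = u ++ bs ++ v := by
  intro bs
  induction bs with
  | nil => intro u v _ _ _; simp
  | cons b bs ih =>
    intro u v hb hu hv
    have hkb : k' b = c := hb b (by simp)
    have h1 : PySem.List.insertBy (fun p q => decide (k' q < k' p)) b (u ++ v) = u ++ b :: v := by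
      rw [pv_insertBy_prefix _ _ u v (fun z hz => by simp [hkb, hu z hz])]
      rw [pv_insertBy_all _ _ v (fun z hz => by simp [hkb, hv z hz])]
    simp only [List.foldl_cons, h1]
    have := ih (u ++ [b]) v (fun x hx => hb x (by simp [hx])) ?_ hv
    · rw [show u ++ b :: v = (u ++ [b]) ++ v by simp] at *
      rw [this]; simp
    · intro z hz
      rcases List.mem_append.1 hz with h | h
      · exact hu z h
      · simp at h; subst h; simp [hkb]

theorem pv_foldl_ins_prefix {β : Type} (k' : β → String) (c : String) :
    ∀ (bs : List β) (w X : List β), (∀ b ∈ bs, k' b = c) → (∀ z ∈ w, ¬ k' z < c) →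
    bs.foldl (fun l b => PySem.List.insertBy (fun p q => decide (k' q < k' p)) b l) (w ++ X)
      = w ++ bs.foldl (fun l b => PySem.List.insertBy (fun p q => decide (k' q < k' p)) b l) X := by
  intro bs
  induction bs with
  | nil => intro w X _ _; simp
  | cons b bs ih =>
    intro w X hb hw
    simp only [List.foldl_cons]
    rw [pv_insertBy_prefix _ _ w X (fun z hz => by simp [hb b (by simp), hw z hz])]
    exact ih w _ (fun x hx => hb x (by simp [hx])) hw

theorem pv_insertBy_pairwise {α : Type} (k : α → String) (a : α) (acc : List α)
    (hacc : acc.Pairwise (fun x y => k y ≤ k x)) :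
    (PySem.List.insertBy (fun p q => decide (k q < k p)) a acc).Pairwise (fun x y => k y ≤ k x) := by
  induction acc with
  | nil => simp [PySem.List.insertBy]
  | cons y acc ih =>
    rcases List.pairwise_cons.1 hacc with ⟨hy, hacc'⟩
    by_cases h : k y < k a
    · simp only [PySem.List.insertBy, decide_eq_true_eq, if_pos h]
      refine List.pairwise_cons.2 ⟨?_, hacc⟩
      intro z hz
      rcases hz with _ | hz
      · exact le_of_lt h
      · exact le_trans (hy z (by assumption)) (le_of_lt h)
    · simp only [PySem.List.insertBy, decide_eq_true_eq, if_neg h]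
      refine List.pairwise_cons.2 ⟨?_, ih hacc'⟩
      intro z hz
      rcases (PySem.List.mem_insertBy _ _ _ _).1 hz with rfl | hz
      · exact le_of_not_gt h
      · exact hy z hz

theorem pv_ins_flatMap {α β : Type} (g : α → List β) (k : α → String) (k' : β → String)
    (hg : ∀ a b, b ∈ g a → k' b = k a) (a : α) :
    ∀ (acc : List α), acc.Pairwise (fun x y => k y ≤ k x) →
    (PySem.List.insertBy (fun p q => decide (k q < k p)) a acc).flatMap g
      = (g a).foldl (fun l b => PySem.List.insertBy (fun p q => decide (k' q < k' p)) b l)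
          (acc.flatMap g) := by
  intro acc
  induction acc with
  | nil =>
    intro _
    have := pv_foldl_ins_equal k' (k a) (g a) [] [] (fun b hb => hg a b hb)
      (by simp) (by simp)
    simpa [PySem.List.insertBy] using this.symm
  | cons y acc ih =>
    intro hacc
    rcases List.pairwise_cons.1 hacc with ⟨hy, hacc'⟩
    by_cases h : k y < k a
    · simp only [PySem.List.insertBy, decide_eq_true_eq, if_pos h]
      have hv : ∀ z ∈ (y :: acc).flatMap g, k' z < k a := by
        intro z hz
        rcases List.mem_flatMap.1 hz with ⟨w, hw, hzw⟩
        rw [hg w z hzw]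
        rcases hw with _ | hw
        · exact h
        · exact lt_of_le_of_lt (hy w (by assumption)) h
      have := pv_foldl_ins_equal k' (k a) (g a) [] ((y :: acc).flatMap g)
        (fun b hb => hg a b hb) (by simp) hv
      simpa using this.symm
    · simp only [PySem.List.insertBy, decide_eq_true_eq, if_neg h]
      rw [List.flatMap_cons, List.flatMap_cons]
      rw [pv_foldl_ins_prefix k' (k a) (g a) (g y) (acc.flatMap g)
        (fun b hb => hg a b hb)
        (fun z hz => by rw [hg y z hz]; exact h)]
      rw [ih hacc']

theorem pv_foldl_flatMap_sorted {α β : Type} (g : α → List β) (k : α → String) (k' : β → String)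
    (hg : ∀ a b, b ∈ g a → k' b = k a) :
    ∀ (L : List α) (acc : List α), acc.Pairwise (fun x y => k y ≤ k x) →
    (L.foldl (fun ac a => PySem.List.insertBy (fun p q => decide (k q < k p)) a ac) acc).flatMap g
      = L.foldl (fun ac a => (g a).foldl
          (fun l b => PySem.List.insertBy (fun p q => decide (k' q < k' p)) b l) ac)
          (acc.flatMap g) := by
  intro L
  induction L with
  | nil => intro acc _; rfl
  | cons a L ih =>
    intro acc hacc
    simp only [List.foldl_cons]
    rw [ih _ (pv_insertBy_pairwise k a acc hacc), pv_ins_flatMap g k k' hg a acc hacc]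

theorem pv_sorted_flatMap {α β : Type} (g : α → List β) (k : α → String) (k' : β → String)
    (hg : ∀ a b, b ∈ g a → k' b = k a) (L : List α) :
    (PySem.List.sorted L k true).flatMap g = PySem.List.sorted (L.flatMap g) k' true := by
  rw [PySem.List.sorted_rev_eq_foldl_insertBy, PySem.List.sorted_rev_eq_foldl_insertBy,
    List.foldl_flatMap]
  simpa using pv_foldl_flatMap_sorted g k k' hg L [] (by simp)



theorem pv_stepA_eq_modify (d : PySem.Dict String (List (String × String))) (k : String) (e : String × String) :
    pvStepA d k e = d.modify k [] (fun l => l ++ [e]) := by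
  unfold pvStepA
  by_cases h : d.contains k = false
  · rw [if_pos h, PySem.Dict.modify, PySem.Dict.getD_of_not_contains _ _ h]
    rfl
  · rw [if_neg h]

theorem pv_foldMod (M : List (String × String × String)) (d : PySem.Dict String (List (String × String))) :
    M.foldl (fun d t => (d.modify t.1 [] (fun l => l ++ [(t.2.1, t.2.2)])).modify t.2.1 []
      (fun l => l ++ [(t.1, t.2.2)])) d
    = (pvPairs M).foldl (fun d p => d.modify p.1 [] (fun l => l ++ [p.2])) d := by
  rw [pvPairs, List.foldl_flatMap]
  rfl

theorem pv_mem_pairs_fst (M : List (String × String × String)) (x : String) :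
    x ∈ (pvPairs M).map (fun p => p.1) ↔ ∃ t ∈ M, x = t.1 ∨ x = t.2.1 := by
  simp only [pvPairs, List.mem_map, List.mem_flatMap, List.mem_cons, List.not_mem_nil, or_false]
  constructor
  · rintro ⟨p, ⟨t, ht, rfl | rfl⟩, rfl⟩
    · exact ⟨t, ht, Or.inl rfl⟩
    · exact ⟨t, ht, Or.inr rfl⟩
  · rintro ⟨t, ht, rfl | rfl⟩
    · exact ⟨(t.1, (t.2.1, t.2.2)), ⟨t, ht, Or.inl rfl⟩, rfl⟩
    · exact ⟨(t.2.1, (t.1, t.2.2)), ⟨t, ht, Or.inr rfl⟩, rfl⟩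

theorem pv_keys_setdefault_add {ν : Type} (d : PySem.Dict String ν) (k : String) (v : ν) :
    (d.setdefault k v).keys = PySem.Set.add d.keys k := by
  by_cases h : d.contains k = true
  · rw [PySem.Dict.setdefault_of_contains _ _ h,
      PySem.Set.add_of_mem ((PySem.Dict.contains_iff_mem_keys _ _).1 h)]
  · have h' : d.contains k = false := by simpa using h
    rw [PySem.Dict.setdefault_of_not_contains _ _ h',
      PySem.Set.add_of_not_mem (fun hm => h ((PySem.Dict.contains_iff_mem_keys _ _).2 hm))]
    simp [PySem.Dict.insert, PySem.Dict.keys, h']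

theorem pv_setdefault_getD (d : PySem.Dict String (List (String × String))) (k : String)
    (h : ∀ c, d.getD c [] = []) : ∀ c, (d.setdefault k []).getD c [] = [] := by
  intro c
  by_cases hc : c = k
  · subst hc; rw [PySem.Dict.getD_setdefault_self]; exact h c
  · rw [PySem.Dict.getD_eq_get?_getD, PySem.Dict.get?_setdefault_of_ne _ _ hc,
      ← PySem.Dict.getD_eq_get?_getD]
    exact h c

theorem pv_base_getD : ∀ (L : List (String × String × String)) (d : PySem.Dict String (List (String × String))),
    (∀ c, d.getD c [] = []) →
    ∀ c, (L.foldl (fun d t => (d.setdefault t.1 []).setdefault t.2.1 []) d).getD c [] = [] := by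
  intro L
  induction L with
  | nil => intro d h c; exact h c
  | cons t L ih =>
    intro d h c
    exact ih _ (pv_setdefault_getD _ _ (pv_setdefault_getD _ _ h)) c

theorem pv_keys_fold0 : ∀ (L : List (String × String × String)) (d : PySem.Dict String (List (String × String))),
    (L.foldl (fun d t => (d.setdefault t.1 []).setdefault t.2.1 []) d).keys
      = L.foldl (fun s t => PySem.Set.add (PySem.Set.add s t.1) t.2.1) d.keys := by
  intro L
  induction L with
  | nil => intro d; rfl
  | cons t L ih =>
    intro d
    simp only [List.foldl_cons]
    rw [ih, pv_keys_setdefault_add, pv_keys_setdefault_add]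

theorem pv_pairs_fst_flatMap (M : List (String × String × String)) :
    (pvPairs M).map (fun p => p.1) = M.flatMap (fun t => [t.1, t.2.1]) := by
  simp [pvPairs, List.map_flatMap]

theorem pv_keys_base (L : List (String × String × String)) :
    (L.foldl (fun d t => (d.setdefault t.1 []).setdefault t.2.1 [])
        (PySem.Dict.empty : PySem.Dict String (List (String × String)))).keys
      = PySem.Set.ofList ((pvPairs L).map (fun p => p.1)) := by
  rw [pv_keys_fold0, pv_pairs_fst_flatMap, PySem.Set.ofList_eq_foldl, List.foldl_flatMap,
    PySem.Dict.keys_empty]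
  rfl

theorem pv_extract_sorted (L : List (String × String × String)) (c : String) :
    PySem.List.sorted (((pvPairs L).filter (fun p => p.1 == c)).map (fun p => p.2)) (fun x => x.2) true
      = ((pvPairs (PySem.List.sorted L (fun t => t.2.2) true)).filter (fun p => p.1 == c)).map (fun p => p.2) := by
  have hrw : ∀ M : List (String × String × String),
      ((pvPairs M).filter (fun p => p.1 == c)).map (fun p => p.2)
        = M.flatMap (fun t =>
            (List.filter (fun p => p.1 == c) [(t.1, (t.2.1, t.2.2)), (t.2.1, (t.1, t.2.2))]).map
              (fun p => p.2)) := by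
    intro M; rw [pvPairs, List.filter_flatMap, List.map_flatMap]
  have hg : ∀ (t : String × String × String) (b : String × String),
      b ∈ (List.filter (fun p => p.1 == c)
          ([(t.1, (t.2.1, t.2.2)), (t.2.1, (t.1, t.2.2))] : List (String × String × String))).map
        (fun p => p.2) → b.2 = t.2.2 := by
    intro t b hb
    simp only [List.mem_map, List.mem_filter, List.mem_cons, List.not_mem_nil, or_false] at hb
    rcases hb with ⟨p, ⟨rfl | rfl, _⟩, rfl⟩ <;> rfl
  rw [hrw, hrw]
  exact (pv_sorted_flatMap _ (fun t => t.2.2) (fun b : String × String => b.2) hg L).symm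


theorem pv_main (L : List (String × String × String)) (n : Int) : most_similar_persons L n = most_similar_persons_alt L n := by
  have hstep : (fun (d : PySem.Dict String (List (String × String))) (t : String × String × String) =>
        pvStepA (pvStepA d t.1 (t.2.1, t.2.2)) t.2.1 (t.1, t.2.2))
      = fun d t => (d.modify t.1 [] (fun l => l ++ [(t.2.1, t.2.2)])).modify t.2.1 []
          (fun l => l ++ [(t.1, t.2.2)]) := by
    funext d t; rw [pv_stepA_eq_modify, pv_stepA_eq_modify]
  unfold most_similar_persons most_similar_persons_alt
  simp only [hstep, pv_foldMod]
  set srt := PySem.List.sorted L (fun t => t.2.2) true with hsrt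
  set dA := (pvPairs L).foldl (fun d p => d.modify p.1 [] (fun l => l ++ [p.2]))
    (PySem.Dict.empty : PySem.Dict String (List (String × String))) with hdA
  set base := L.foldl (fun d t => (d.setdefault t.1 []).setdefault t.2.1 [])
    (PySem.Dict.empty : PySem.Dict String (List (String × String))) with hbase
  set dB := (pvPairs srt).foldl (fun d p => d.modify p.1 [] (fun l => l ++ [p.2])) base with hdB
  have hKA : dA.keys = PySem.Set.ofList ((pvPairs L).map (fun p => p.1)) := by
    rw [hdA, PySem.Dict.keys_foldl_modify_key (pvPairs L) (fun p => p.1) []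
      (fun _ p => fun l => l ++ [p.2]) _, PySem.Dict.keys_empty, PySem.Set.update_nil_left]
  have hKbase : base.keys = PySem.Set.ofList ((pvPairs L).map (fun p => p.1)) := pv_keys_base L
  have hKB : dB.keys = dA.keys := by
    rw [hdB, PySem.Dict.keys_foldl_modify_key (pvPairs srt) (fun p => p.1) []
      (fun _ p => fun l => l ++ [p.2]) _, PySem.Set.update_eq_append_filter]
    have hnil : List.filter (fun y => !PySem.Set.contains base.keys y)
        (PySem.Set.ofList ((pvPairs srt).map (fun p => p.1))) = [] := by
      rw [List.filter_eq_nil_iff]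
      intro y hy
      have hy' : y ∈ (pvPairs srt).map (fun p => p.1) := (PySem.Set.mem_ofList _ _).1 hy
      have hyL : y ∈ (pvPairs L).map (fun p => p.1) := by
        rcases (pv_mem_pairs_fst _ _).1 hy' with ⟨t, ht, hor⟩
        exact (pv_mem_pairs_fst _ _).2 ⟨t, (PySem.List.mem_sorted _ _ _ _).1 ht, hor⟩
      have hmem : y ∈ base.keys := by rw [hKbase]; exact (PySem.Set.mem_ofList _ _).2 hyL
      simp only [(PySem.Set.contains_iff base.keys y).2 hmem, Bool.not_true,
        Bool.false_eq_true, not_false_eq_true]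
    rw [hnil, List.append_nil, hKbase, hKA]
  have hndA : dA.keys.Nodup := by
    rw [hdA]
    exact PySem.Dict.nodup_keys_foldl_modify_key (pvPairs L) (fun p => p.1) []
      (fun _ p => fun l => l ++ [p.2]) _ PySem.Dict.nodup_keys_empty
  have hndB : dB.keys.Nodup := by rw [hKB]; exact hndA
  rw [PySem.Dict.items_eq_map_keys dA hndA [], PySem.Dict.items_eq_map_keys dB hndB [], hKB]
  rw [List.map_map, List.map_map]
  apply List.map_congr_left
  intro k _
  simp only [Function.comp]
  have hgA : dA.getD k [] = ((pvPairs L).filter (fun p => p.1 == k)).map (fun p => p.2) := by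
    rw [hdA, PySem.Dict.getD_foldl_modify_append, PySem.Dict.getD_empty, List.nil_append]
  have hgB : dB.getD k [] = ((pvPairs srt).filter (fun p => p.1 == k)).map (fun p => p.2) := by
    rw [hdB, PySem.Dict.getD_foldl_modify_append, hbase,
      pv_base_getD L _ (fun c => PySem.Dict.getD_empty c []) k, List.nil_append]
  rw [hgA, hgB, hsrt, pv_extract_sorted]

-- ===== VERDICT (by name: the statement is the Claim_ definition above) =====
theorem most_similar_persons_spec : Claim_equal_most_similar_persons := by
  intro similar_items num_similar_persons _
  unfold Spec_most_similar_persons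
  exact pv_main similar_items num_similar_persons
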